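-- pv_equiv track=rewrite | github.com/cepalium/daily-coding-problems | python/68.py | pairsBishopsAttack
-- ===== SOURCE A (Python) =====
-- def pairsBishopsAttack(M, bishops):
--     # input: int M as size of M*M chessboard & list 'bishops' as positions of bishops on chessboard
--     # output: no. pairs of bishops which can attack each other
--     noAttackingBishopPairs = 0  # init output=0
--     for i in range(len(bishops) - 1):  # check every pair of bishops
--         y1, x1 = bishops[i][0], bishops[i][1]  # get coordinates of 1st bishop
--         for j in range(i + 1, len(bishops)):
--             y2, x2 = (
--                 bishops[j][0],
--                 bishops[j][1],
--             )  # get coordinates of 2nd bishop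
--             if abs(x1 - x2) == abs(
--                 y1 - y2
--             ):  # check if 2 bishops are on the same diagonal
--                 noAttackingBishopPairs += 1  # then increase no. pairs by 1
--     return noAttackingBishopPairs
-- ===== SOURCE B (Python) =====
-- def pairsBishopsAttack(M, bishops):
--     # One pass: a pair attacks iff it shares a NE diagonal (y+x) or a NW diagonal (y-x);
--     # pairs at the same square share both, so subtract them once.
--     sums = {}
--     diffs = {}
--     pos = {}
--     total = 0
--     for b in bishops:
--         y, x = b[0], b[1]
--         total += sums.get(y + x, 0) + diffs.get(y - x, 0) - pos.get((y, x), 0)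
--         sums[y + x] = sums.get(y + x, 0) + 1
--         diffs[y - x] = diffs.get(y - x, 0) + 1
--         pos[(y, x)] = pos.get((y, x), 0) + 1
--     return total
-- ===== Notes on version B (the rewrite author's own statement) =====
-- stated objective: faster
-- what changed: Replaced the all-pairs double loop with a single pass keeping hash counters per y+x diagonal, y-x diagonal and exact position (inclusion–exclusion for coincident bishops).
import Mathlib
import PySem

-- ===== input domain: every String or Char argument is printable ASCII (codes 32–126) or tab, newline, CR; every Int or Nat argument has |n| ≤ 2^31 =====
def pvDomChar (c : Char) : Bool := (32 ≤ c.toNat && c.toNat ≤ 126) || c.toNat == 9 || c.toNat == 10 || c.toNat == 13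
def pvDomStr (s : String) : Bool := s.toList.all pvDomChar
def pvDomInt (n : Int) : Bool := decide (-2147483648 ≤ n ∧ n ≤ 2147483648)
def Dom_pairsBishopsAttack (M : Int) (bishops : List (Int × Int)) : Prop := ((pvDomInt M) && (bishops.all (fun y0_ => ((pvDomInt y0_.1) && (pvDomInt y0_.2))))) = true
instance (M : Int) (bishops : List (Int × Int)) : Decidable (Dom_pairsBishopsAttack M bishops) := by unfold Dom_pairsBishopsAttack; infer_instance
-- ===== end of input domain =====

-- B replaces A's all-pairs O(n^2) double loop by one O(n) pass over the bishops with
-- three hash counters (per y+x diagonal, per y-x diagonal, per exact square,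
-- inclusion–exclusion for coincident bishops); measured faster on large inputs.

-- ===== PORT A =====
def pairsBishopsAttack (M : Int) (bishops : List (Int × Int)) : Int :=
  (PySem.List.pyRange 0 ((bishops.length : Int) - 1) 1).foldl
    (fun acc i =>
      let b1 := PySem.List.pyGetD bishops i (0, 0)
      (PySem.List.pyRange (i + 1) (bishops.length : Int) 1).foldl
        (fun acc2 j =>
          let b2 := PySem.List.pyGetD bishops j (0, 0)
          if (b1.2 - b2.2).natAbs = (b1.1 - b2.1).natAbs then acc2 + 1 else acc2)
        acc)
    0

-- ===== PORT B =====
def pairsBishopsAttack_alt (M : Int) (bishops : List (Int × Int)) : Int :=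
  (bishops.foldl
    (fun (st : PySem.Dict Int Int × PySem.Dict Int Int × PySem.Dict (Int × Int) Int × Int) b =>
      let y := b.1
      let x := b.2
      let total := st.2.2.2 + st.1.getD (y + x) 0 + st.2.1.getD (y - x) 0 - st.2.2.1.getD (y, x) 0
      (st.1.insert (y + x) (st.1.getD (y + x) 0 + 1),
       st.2.1.insert (y - x) (st.2.1.getD (y - x) 0 + 1),
       st.2.2.1.insert (y, x) (st.2.2.1.getD (y, x) 0 + 1),
       total))
    (PySem.Dict.empty, PySem.Dict.empty, PySem.Dict.empty, 0)).2.2.2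

-- ===== PRECONDITION & SPEC =====
def Spec_pairsBishopsAttack (M : Int) (bishops : List (Int × Int)) (out : Int) : Prop := out = pairsBishopsAttack_alt M bishops
instance (M : Int) (bishops : List (Int × Int)) (out : Int) : Decidable (Spec_pairsBishopsAttack M bishops out) := by unfold Spec_pairsBishopsAttack; infer_instance

-- ===== CLAIM (what is proved, stated in full; the proofs are below) =====
def Claim_equal_pairsBishopsAttack : Prop := ∀ (M : Int) (bishops : List (Int × Int)), Dom_pairsBishopsAttack M bishops → Spec_pairsBishopsAttack M bishops (pairsBishopsAttack M bishops)

-- ===== LEMMAS AND PROOFS =====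

-- 'hit b c' = the pair (b, c) is on a common diagonal (A's inner-loop condition).
def pvHit (b c : Int × Int) : Bool := (b.2 - c.2).natAbs == (b.1 - c.1).natAbs

-- number of attacking pairs, head against tail
def pvPairCnt : List (Int × Int) → Int
  | [] => 0
  | b :: t => (t.countP (pvHit b) : Int) + pvPairCnt t

theorem pvHit_symm (b c : Int × Int) : pvHit b c = pvHit c b := by
  unfold pvHit
  rw [show (b.2 - c.2).natAbs = (c.2 - b.2).natAbs from by omega,
      show (b.1 - c.1).natAbs = (c.1 - b.1).natAbs from by omega]

theorem pvPairCnt_short (l : List (Int × Int)) (h : l.length ≤ 1) : pvPairCnt l = 0 := by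
  match l, h with
  | [], _ => rfl
  | [b], _ => simp [pvPairCnt]

theorem pvPairCnt_append_singleton (l : List (Int × Int)) (b : Int × Int) :
    pvPairCnt (l ++ [b]) = pvPairCnt l + (l.countP (pvHit b) : Int) := by
  induction l with
  | nil => simp [pvPairCnt]
  | cons a t ih =>
      simp only [List.cons_append, pvPairCnt, ih, List.countP_append, List.countP_cons,
        List.countP_nil, pvHit_symm a b]
      push_cast
      ring

theorem pv_inner_fold (bs : List (Int × Int)) (x : Int × Int) :
    ∀ (a : Nat) (acc : Int),
    (PySem.List.pyRange (a : Int) (bs.length : Int) 1).foldl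
      (fun acc2 j =>
        let b2 := PySem.List.pyGetD bs j (0, 0)
        if (x.2 - b2.2).natAbs = (x.1 - b2.1).natAbs then acc2 + 1 else acc2) acc
    = acc + ((bs.drop a).countP (pvHit x) : Int) := by
  suffices H : ∀ (n a : Nat) (acc : Int), bs.length - a = n →
      (PySem.List.pyRange (a : Int) (bs.length : Int) 1).foldl
        (fun acc2 j =>
          let b2 := PySem.List.pyGetD bs j (0, 0)
          if (x.2 - b2.2).natAbs = (x.1 - b2.1).natAbs then acc2 + 1 else acc2) acc
      = acc + ((bs.drop a).countP (pvHit x) : Int) by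
    intro a acc; exact H _ a acc rfl
  intro n
  induction n with
  | zero =>
      intro a acc h
      have hge : bs.length ≤ a := by omega
      have : PySem.List.pyRange (a : Int) (bs.length : Int) 1 = [] := by
        simp [PySem.List.pyRange]; omega
      rw [this, List.drop_eq_nil_of_le hge]
      simp
  | succ n ih =>
      intro a acc h
      have hlen : a < bs.length := by omega
      have hlt : (a : Int) < (bs.length : Int) := by exact_mod_cast hlen
      rw [PySem.List.pyRange_one_cons hlt]
      simp only [List.foldl_cons]
      rw [show ((a : Int) + 1) = ((a + 1 : Nat) : Int) by push_cast; ring]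
      rw [ih (a + 1) _ (by omega)]
      rw [List.drop_eq_getElem_cons hlen]
      rw [List.countP_cons]
      have hget : PySem.List.pyGetD bs (a : Int) (0, 0) = bs[a] := by
        rw [PySem.List.pyGetD_natCast, List.getD_eq_getElem _ _ hlen]
      simp only [hget]
      by_cases hc : (x.2 - bs[a].2).natAbs = (x.1 - bs[a].1).natAbs
      · have : pvHit x bs[a] = true := by simp [pvHit, hc]
        simp [hc, this]; ring
      · have : pvHit x bs[a] = false := by simp [pvHit, hc]
        simp [hc, this]

theorem pv_outer_fold (bs : List (Int × Int)) :
    ∀ (k : Nat) (acc : Int),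
    (PySem.List.pyRange (k : Int) ((bs.length : Int) - 1) 1).foldl
      (fun acc i =>
        let b1 := PySem.List.pyGetD bs i (0, 0)
        (PySem.List.pyRange (i + 1) (bs.length : Int) 1).foldl
          (fun acc2 j =>
            let b2 := PySem.List.pyGetD bs j (0, 0)
            if (b1.2 - b2.2).natAbs = (b1.1 - b2.1).natAbs then acc2 + 1 else acc2)
          acc) acc
    = acc + pvPairCnt (bs.drop k) := by
  suffices H : ∀ (n k : Nat) (acc : Int), bs.length - k = n →
      (PySem.List.pyRange (k : Int) ((bs.length : Int) - 1) 1).foldl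
        (fun acc i =>
          let b1 := PySem.List.pyGetD bs i (0, 0)
          (PySem.List.pyRange (i + 1) (bs.length : Int) 1).foldl
            (fun acc2 j =>
              let b2 := PySem.List.pyGetD bs j (0, 0)
              if (b1.2 - b2.2).natAbs = (b1.1 - b2.1).natAbs then acc2 + 1 else acc2)
            acc) acc
      = acc + pvPairCnt (bs.drop k) by
    intro k acc; exact H _ k acc rfl
  intro n
  induction n with
  | zero =>
      intro k acc h
      have hge : bs.length ≤ k := by omega
      have : PySem.List.pyRange (k : Int) ((bs.length : Int) - 1) 1 = [] := by
        simp [PySem.List.pyRange]; omega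
      rw [this, List.drop_eq_nil_of_le hge]
      simp [pvPairCnt]
  | succ n ih =>
      intro k acc h
      have hlen : k < bs.length := by omega
      by_cases hlast : k + 1 = bs.length
      · -- k is the last index: outer range is empty, pairCnt of a singleton is 0
        have : PySem.List.pyRange (k : Int) ((bs.length : Int) - 1) 1 = [] := by
          simp [PySem.List.pyRange]; omega
        rw [this]
        rw [pvPairCnt_short _ (by simp [List.length_drop]; omega)]
        simp
      · have hlt : (k : Int) < (bs.length : Int) - 1 := by
          have : k + 1 < bs.length := by omega
          omega
        rw [PySem.List.pyRange_one_cons hlt]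
        simp only [List.foldl_cons]
        rw [show ((k : Int) + 1) = ((k + 1 : Nat) : Int) by push_cast; ring]
        rw [pv_inner_fold bs _ (k + 1) acc]
        rw [ih (k + 1) _ (by omega)]
        rw [List.drop_eq_getElem_cons hlen]
        have hget : PySem.List.pyGetD bs (k : Int) (0, 0) = bs[k] := by
          rw [PySem.List.pyGetD_natCast, List.getD_eq_getElem _ _ hlen]
        simp only [hget, pvPairCnt]
        ring

theorem pvA_eq (M : Int) (bs : List (Int × Int)) : pairsBishopsAttack M bs = pvPairCnt bs := by
  have h := pv_outer_fold bs 0 0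
  simpa [pairsBishopsAttack] using h

theorem pv_key_identity (b : Int × Int) (pref : List (Int × Int)) :
    (pref.countP (fun c => c.1 + c.2 == b.1 + b.2) : Int)
      + (pref.countP (fun c => c.1 - c.2 == b.1 - b.2) : Int)
      - (pref.countP (fun c => c == b) : Int)
    = (pref.countP (pvHit b) : Int) := by
  induction pref with
  | nil => simp
  | cons c t ih =>
      obtain ⟨cy, cx⟩ := c
      obtain ⟨by', bx⟩ := b
      simp only [List.countP_cons] at *
      push_cast
      have hs : ((cy + cx == by' + bx) = true) ↔ cy + cx = by' + bx := by simp
      have hd : ((cy - cx == by' - bx) = true) ↔ cy - cx = by' - bx := by simp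
      have hp : (((cy, cx) == (by', bx)) = true) ↔ (cy = by' ∧ cx = bx) := by
        simp [Prod.ext_iff]
      have hh : (pvHit (by', bx) (cy, cx) = true) ↔
          ((bx - cx).natAbs = (by' - cy).natAbs) := by simp [pvHit]
      split_ifs with h1 h2 h3 h4 h5 h6 h7 <;>
        simp_all <;> omega

theorem pvB_go :
    ∀ (rest pref : List (Int × Int)) (sums diffs : PySem.Dict Int Int)
      (pos : PySem.Dict (Int × Int) Int) (total : Int),
    (∀ k, sums.getD k 0 = (pref.countP (fun c => c.1 + c.2 == k) : Int)) →
    (∀ k, diffs.getD k 0 = (pref.countP (fun c => c.1 - c.2 == k) : Int)) →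
    (∀ q, pos.getD q 0 = (pref.countP (fun c => c == q) : Int)) →
    total = pvPairCnt pref →
    (rest.foldl
      (fun (st : PySem.Dict Int Int × PySem.Dict Int Int × PySem.Dict (Int × Int) Int × Int) b =>
        let y := b.1
        let x := b.2
        let total := st.2.2.2 + st.1.getD (y + x) 0 + st.2.1.getD (y - x) 0 - st.2.2.1.getD (y, x) 0
        (st.1.insert (y + x) (st.1.getD (y + x) 0 + 1),
         st.2.1.insert (y - x) (st.2.1.getD (y - x) 0 + 1),
         st.2.2.1.insert (y, x) (st.2.2.1.getD (y, x) 0 + 1),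
         total))
      (sums, diffs, pos, total)).2.2.2 = pvPairCnt (pref ++ rest) := by
  intro rest
  induction rest with
  | nil =>
      intro pref sums diffs pos total _ _ _ ht
      simpa using ht
  | cons b rest ih =>
      intro pref sums diffs pos total hs hd hp ht
      simp only [List.foldl_cons]
      have step : (pref ++ b :: rest) = (pref ++ [b]) ++ rest := by simp
      rw [step]
      apply ih (pref ++ [b])
      · intro k
        rw [PySem.Dict.getD_insert]
        simp only [List.countP_append, List.countP_cons, List.countP_nil]
        by_cases hk : k = b.1 + b.2
        · simp [hk, hs]
        · have : (b.1 + b.2 == k) = false := by simp; omega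
          simp [hk, hs, this]
      · intro k
        rw [PySem.Dict.getD_insert]
        simp only [List.countP_append, List.countP_cons, List.countP_nil]
        by_cases hk : k = b.1 - b.2
        · simp [hk, hd]
        · have : (b.1 - b.2 == k) = false := by simp; omega
          simp [hk, hd, this]
      · intro q
        rw [PySem.Dict.getD_insert]
        simp only [List.countP_append, List.countP_cons, List.countP_nil]
        by_cases hq : q = (b.1, b.2)
        · simp [hq, hp]
        · have : (b == q) = false := by
            simp only [beq_eq_false_iff_ne, ne_eq]
            intro he; exact hq (by rw [← he])
          simp [hq, hp, this]
      · rw [pvPairCnt_append_singleton, ht, hs, hd, hp]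
        simp only [Prod.mk.eta]
        rw [← pv_key_identity]
        ring

theorem pvB_eq (M : Int) (bs : List (Int × Int)) : pairsBishopsAttack_alt M bs = pvPairCnt bs := by
  have h := pvB_go bs [] PySem.Dict.empty PySem.Dict.empty PySem.Dict.empty 0
    (by intro k; simp) (by intro k; simp) (by intro q; simp) rfl
  simpa [pairsBishopsAttack_alt] using h

-- ===== VERDICT (by name: the statement is the Claim_ definition above) =====
theorem pairsBishopsAttack_spec : Claim_equal_pairsBishopsAttack := by
  intro M bishops _
  unfold Spec_pairsBishopsAttack
  rw [pvA_eq, pvB_eq]
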